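-- pv_equiv track=rewrite | github.com/shermanyan/CS003C | Lab_7/P5.25.py | printBarCode
-- ===== SOURCE A (Python) =====
-- def printDigit(digit):
--     if digit == "9":
--         return "|:|::"
--     elif digit == "8":
--         return "|::|:"
--     elif digit == "7":
--         return "|:::|"
--     elif digit == "6":
--         return ":||::"
--     elif digit == "5":
--         return ":|:|:"
--     elif digit == "4":
--         return ":|::|"
--     elif digit == "3":
--         return "::||:"
--     elif digit == "2":
--         return "::|:|"
--     elif digit == "1":
--         return ":::||"
--     elif digit == "0":
--         return "||:::"
--
-- def printBarCode(zipCode):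
--     code = str(zipCode)
--     n = 0
--
--     for i in range(len(code)):
--         n = n + int(code[i])
--
--     if not n % 10 == 0:
--         n = n % 10
--         n = 10 - n
--         code = code + str(n)
--
--     res = "|"
--
--     for i in range(len(code)):
--         res += printDigit(code[i])
--
--     res += "|"
--
--     return res
-- ===== SOURCE B (Python) =====
-- def printBarCode(zipCode):
--     code = str(zipCode)
--     digits = [int(c) for c in code]
--     s = sum(digits)
--     if s % 10:
--         digits.append(10 - s % 10)
--     out = ['|']
--     for d in digits:
--         v = 11 if d == 0 else d
--         bars = 0
--         for w in (7, 4, 2, 1):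
--             if w <= v:
--                 v -= w
--                 out.append('|')
--                 bars += 1
--             else:
--                 out.append(':')
--         out.append('|' if bars == 1 else ':')
--     out.append('|')
--     return ''.join(out)
-- ===== Notes on version B (the rewrite author's own statement) =====
-- stated objective: alternative
-- what changed: Replaces the ten-branch per-digit lookup table with a computed POSTNET encoding: greedy bar selection over the weights 7,4,2,1 (digit 0 read as 11) plus a parity bar, concatenated in one pass over the digit values.
import Mathlib
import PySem

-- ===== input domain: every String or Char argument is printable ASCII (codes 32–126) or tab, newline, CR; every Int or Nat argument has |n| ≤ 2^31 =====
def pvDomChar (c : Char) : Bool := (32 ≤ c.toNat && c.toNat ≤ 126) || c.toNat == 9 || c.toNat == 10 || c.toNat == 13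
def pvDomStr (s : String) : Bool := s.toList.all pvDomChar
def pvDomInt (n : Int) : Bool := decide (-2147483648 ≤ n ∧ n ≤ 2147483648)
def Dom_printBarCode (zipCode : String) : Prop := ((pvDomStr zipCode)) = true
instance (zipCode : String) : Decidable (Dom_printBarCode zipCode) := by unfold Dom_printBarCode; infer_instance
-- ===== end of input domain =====

-- B replaces the ten-branch per-digit lookup table with a computed POSTNET encoding
-- (greedy bar selection over the weights 7,4,2,1 plus a parity bar); objective: alternative.


-- ===== PORT A =====
-- printDigit: the if-chain of A; Python returns None for a non-digit argument, which under
-- Pre_ (all-digit input) is unreachable — modelled as [] there.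
def printDigitA (c : Char) : List Char :=
  if c == '9' then "|:|::".toList
  else if c == '8' then "|::|:".toList
  else if c == '7' then "|:::|".toList
  else if c == '6' then ":||::".toList
  else if c == '5' then ":|:|:".toList
  else if c == '4' then ":|::|".toList
  else if c == '3' then "::||:".toList
  else if c == '2' then "::|:|".toList
  else if c == '1' then ":::||".toList
  else if c == '0' then "||:::".toList
  else []

-- int(code[i]) raises on a non-digit char: `.getD 0` is unreachable under Pre_.
def printBarCode (zipCode : String) : String :=
  let code := zipCode.toList
  let n : Int := (PySem.List.pyRange 0 (PySem.List.len code)).foldl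
      (fun n i => n + (PySem.Int.ofChars? [PySem.List.pyGetD code i ' ']).getD 0) 0
  let code :=
    if ¬ (PySem.Int.mod n 10 == 0) then
      let n := PySem.Int.mod n 10
      let n := 10 - n
      code ++ PySem.Int.toChars n
    else code
  let res := (PySem.List.pyRange 0 (PySem.List.len code)).foldl
      (fun res i => res ++ printDigitA (PySem.List.pyGetD code i ' ')) ['|']
  String.ofList (res ++ ['|'])

-- ===== PORT B =====
-- inner loop of Source B: greedy bar selection over the weights, then the parity (0-weight) bar
def encB (d : Int) : List Char :=
  let v : Int := if d == 0 then 11 else d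
  let st := [(7 : Int), 4, 2, 1].foldl
      (fun (acc : List Char × Int × Int) w =>
        if w ≤ acc.2.1 then (acc.1 ++ ['|'], acc.2.1 - w, acc.2.2 + 1)
        else (acc.1 ++ [':'], acc.2.1, acc.2.2))
      ([], v, 0)
  st.1 ++ [if st.2.2 == 1 then '|' else ':']

def printBarCode_alt (zipCode : String) : String :=
  let digits := zipCode.toList.map (fun c => (PySem.Int.ofChars? [c]).getD 0)
  let s : Int := digits.sum
  let digits := if PySem.Int.mod s 10 ≠ 0 then digits ++ [10 - PySem.Int.mod s 10] else digits
  let out := digits.foldl (fun out d => out ++ encB d) ['|']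
  String.ofList (out ++ ['|'])

-- ===== PRECONDITION & SPEC =====
-- Pre_: every character is an ASCII digit — on any other character int(code[i]) raises ValueError in A.
def Pre_printBarCode (zipCode : String) : Prop := zipCode.toList.all Char.isDigit = true
instance (zipCode : String) : Decidable (Pre_printBarCode zipCode) := by unfold Pre_printBarCode; infer_instance
def pvWitness_printBarCode : String := "95014"

def Spec_printBarCode (zipCode : String) (out : String) : Prop := out = printBarCode_alt zipCode
instance (zipCode : String) (out : String) : Decidable (Spec_printBarCode zipCode out) := by unfold Spec_printBarCode; infer_instance

-- ===== CLAIM (what is proved, stated in full; the proofs are below) =====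
def Claim_equal_printBarCode : Prop := ∀ (zipCode : String), Dom_printBarCode zipCode → Pre_printBarCode zipCode → Spec_printBarCode zipCode (printBarCode zipCode)

-- ===== LEMMAS AND PROOFS =====

def digitVal (c : Char) : Int := (PySem.Int.ofChars? [c]).getD 0

lemma digit_mem (c : Char) (h : c.isDigit = true) :
    c ∈ ['0','1','2','3','4','5','6','7','8','9'] := by
  simp [Char.isDigit] at h
  obtain ⟨h1, h2⟩ := h
  have h1' : 48 ≤ c.toNat := h1
  have h2' : c.toNat ≤ 57 := h2
  have := Char.ofNat_toNat c
  interval_cases h : c.toNat <;> simp [← this]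

-- per-character agreement: the table row equals the computed POSTNET pattern
lemma table_eq_enc (c : Char) (h : c.isDigit = true) :
    printDigitA c = encB (digitVal c) := by
  have hm := digit_mem c h
  fin_cases hm <;> decide

lemma check_digit_enc (k : Int) (h1 : 1 ≤ k) (h2 : k ≤ 9) :
    (PySem.Int.toChars k).flatMap printDigitA = encB k := by
  interval_cases k <;> decide

lemma sum_digits (code : List Char) :
    code.foldl (fun n c => n + digitVal c) 0 = (code.map digitVal).sum := by
  rw [List.sum_eq_foldl, List.foldl_map]

lemma flatMap_table_eq (code : List Char) (h : code.all Char.isDigit = true) :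
    code.flatMap printDigitA = (code.map digitVal).flatMap encB := by
  induction code with
  | nil => rfl
  | cons c cs ih =>
    simp only [List.all_cons, Bool.and_eq_true] at h
    simp only [List.flatMap_cons, List.map_cons, ih h.2, table_eq_enc c h.1]

lemma mod10_pos_bounds (n : Int) (h : PySem.Int.mod n 10 ≠ 0) :
    1 ≤ 10 - PySem.Int.mod n 10 ∧ 10 - PySem.Int.mod n 10 ≤ 9 := by
  have h1 := PySem.Int.mod_nonneg n (b := 10) (by omega)
  have h2 := PySem.Int.mod_lt n (b := 10) (by omega)
  omega

-- ===== VERDICT (by name: the statement is the Claim_ definition above) =====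
theorem printBarCode_spec : Claim_equal_printBarCode := by
  intro zipCode _ hpre
  unfold Spec_printBarCode
  show printBarCode zipCode = _
  simp only [printBarCode, printBarCode_alt]
  have hpre' : zipCode.toList.all Char.isDigit = true := hpre
  rw [PySem.List.foldl_pyRange_pyGetD _ ' ' (fun n c => n + (PySem.Int.ofChars? [c]).getD 0) 0 le_rfl,
      PySem.List.foldl_pyRange_pyGetD _ ' ' (fun res c => res ++ printDigitA c) ['|'] le_rfl]
  simp only [Int.toNat_zero, List.drop_zero]
  rw [PySem.List.foldl_append_eq_flatMap, PySem.List.foldl_append_eq_flatMap]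
  show String.ofList (['|'] ++ _ ++ ['|']) = String.ofList (['|'] ++ _ ++ ['|'])
  congr 2
  have hfun : (fun c => (PySem.Int.ofChars? [c]).getD 0) = digitVal := rfl
  rw [hfun]
  have hsum : List.foldl (fun (n : Int) c => n + (PySem.Int.ofChars? [c]).getD 0) 0 zipCode.toList
      = (zipCode.toList.map digitVal).sum := sum_digits _
  rw [hsum]
  set s := (zipCode.toList.map digitVal).sum with hs
  by_cases hmod : PySem.Int.mod s 10 = 0
  · rw [if_neg (by rw [hmod]; decide), if_neg (by rw [hmod]; simp)]
    rw [flatMap_table_eq _ hpre']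
  · rw [if_pos (by simpa using hmod), if_pos hmod]
    obtain ⟨hk1, hk2⟩ := mod10_pos_bounds s hmod
    rw [List.flatMap_append, List.flatMap_append,
        flatMap_table_eq _ hpre', List.flatMap_singleton,
        check_digit_enc _ hk1 hk2]
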